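-- pv_equiv track=rewrite | github.com/thierryxdp/TCC | problems/831/solution_325395.py | lingua_p
-- ===== SOURCE A (Python) =====
-- def lingua_p(palavra):
--     s = ''
--     x=0
--     while x<len(palavra):
--         if palavra[x] in 'aeiou':
--
--             return palavra[x]
--         else:
--             s=s+palavra[x]
--         x=x+1
--     return s
-- ===== SOURCE B (Python) =====
-- def lingua_p(palavra):
--     # Per-vowel search: take each vowel's first-occurrence index via str.find,
--     # the smallest valid one is the position of the first vowel in the word.
--     hits = [i for i in (palavra.find(v) for v in 'aeiou') if i != -1]
--     if hits:
--         return palavra[min(hits)]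
--     return palavra
-- ===== Notes on version B (the rewrite author's own statement) =====
-- stated objective: faster
-- what changed: Replaces the left-to-right scan with its consonant accumulator by five str.find passes (one per vowel): the minimum valid hit index locates the first vowel, and with no hits the word itself is returned, avoiding A's quadratic string concatenation.
import Mathlib
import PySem

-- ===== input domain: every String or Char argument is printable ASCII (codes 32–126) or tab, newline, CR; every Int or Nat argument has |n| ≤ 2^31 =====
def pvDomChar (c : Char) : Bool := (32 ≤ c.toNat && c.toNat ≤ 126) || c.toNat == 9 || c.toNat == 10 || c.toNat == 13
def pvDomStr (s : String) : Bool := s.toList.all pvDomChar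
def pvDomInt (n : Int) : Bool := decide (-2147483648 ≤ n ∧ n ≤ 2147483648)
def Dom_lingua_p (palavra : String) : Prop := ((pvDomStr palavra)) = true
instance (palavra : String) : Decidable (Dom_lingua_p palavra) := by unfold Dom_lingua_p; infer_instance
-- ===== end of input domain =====

-- B replaces A's scan-with-accumulator by five per-vowel str.find passes: the minimum valid
-- hit index is the position of the first vowel; with no hit the word itself is returned.

def pvIsVowel (c : Char) : Bool := "aeiou".toList.contains c

-- ===== PORT A =====
-- A's while loop over indices with the accumulator s, transliterated as recursion over the
-- remaining characters carrying the accumulated consonant list.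
def lingua_pGo : List Char → List Char → String
  | acc, [] => String.ofList acc
  | acc, c :: rest =>
    if pvIsVowel c then String.ofList [c]
    else lingua_pGo (acc ++ [c]) rest

def lingua_p (palavra : String) : String := lingua_pGo [] palavra.toList

-- ===== PORT B =====
-- B: per-vowel first-occurrence indices, filtered to the valid ones.
def pvHits (palavra : String) : List Int :=
  (['a','e','i','o','u'].map (fun v => PySem.Chars.find palavra.toList [v])).filter
    (fun i => i != -1)

def lingua_p_alt (palavra : String) : String :=
  match PySem.List.min? (pvHits palavra) (fun i => i) with
  | some i =>
    match PySem.Str.pyGet? palavra i with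
    | some c => String.ofList [c]
    | none => ""          -- unreachable: a hit is always a valid index
  | none => palavra

-- ===== PRECONDITION & SPEC =====
def Spec_lingua_p (palavra : String) (out : String) : Prop := out = lingua_p_alt palavra
instance (palavra : String) (out : String) : Decidable (Spec_lingua_p palavra out) := by unfold Spec_lingua_p; infer_instance

-- ===== CLAIM (what is proved, stated in full; the proofs are below) =====
def Claim_equal_lingua_p : Prop := ∀ (palavra : String), Dom_lingua_p palavra → Spec_lingua_p palavra (lingua_p palavra)

-- ===== LEMMAS AND PROOFS =====
theorem lingua_pGo_eq (l acc : List Char) :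
    lingua_pGo acc l =
      match l.find? pvIsVowel with
      | some c => String.ofList [c]
      | none => String.ofList (acc ++ l) := by
  induction l generalizing acc with
  | nil => simp [lingua_pGo]
  | cons c rest ih =>
    cases h : pvIsVowel c
    · simp [lingua_pGo, h, List.find?_cons_of_neg, ih]
    · simp [lingua_pGo, h, List.find?_cons_of_pos]

theorem single_prefix_drop (a : Char) (l : List Char) (j : Nat) :
    [a] <+: l.drop j ↔ l[j]? = some a := by
  constructor
  · rintro ⟨t, ht⟩
    have h0 : (l.drop j)[0]? = some a := by rw [← ht]; simp
    simpa using h0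
  · intro h
    have hd : l.drop j = a :: l.drop (j+1) := by
      rw [List.drop_eq_getElem_cons (by exact (List.getElem?_eq_some_iff.mp h).1)]
      simp [List.getElem?_eq_some_iff.mp h |>.2]
    exact ⟨l.drop (j+1), by rw [hd]; rfl⟩

theorem single_infix (a : Char) (l : List Char) : [a] <:+: l ↔ a ∈ l := by
  constructor
  · intro h; exact h.sublist.subset (List.mem_singleton_self a)
  · intro h
    obtain ⟨s, t, rfl⟩ := List.append_of_mem h
    exact ⟨s, t, by simp⟩

theorem vowel_chars (v : Char) (hv : v ∈ ['a','e','i','o','u']) : pvIsVowel v = true := by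
  fin_cases hv <;> decide

-- ===== VERDICT (by name: the statement is the Claim_ definition above) =====
theorem lingua_p_spec : Claim_equal_lingua_p := by
  intro palavra _
  unfold Spec_lingua_p lingua_p lingua_p_alt
  rw [lingua_pGo_eq]
  cases h : palavra.toList.find? pvIsVowel with
  | none =>
    have hnone : ∀ v ∈ ['a','e','i','o','u'], PySem.Chars.find palavra.toList [v] = -1 := by
      intro v hv
      rw [PySem.Chars.find_eq_neg_one_iff, single_infix]
      intro hm
      have := List.find?_eq_none.mp h v hm
      simp [vowel_chars v hv] at this
    have hhits : pvHits palavra = [] := by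
      unfold pvHits
      simp only [List.map_cons, List.map_nil,
        hnone 'a' (by decide), hnone 'e' (by decide), hnone 'i' (by decide),
        hnone 'o' (by decide), hnone 'u' (by decide)]
      decide
    rw [hhits]
    have : PySem.List.min? ([] : List Int) (fun i => i) = none :=
      (PySem.List.min?_eq_none_iff _ _).mpr rfl
    rw [this]
    simp [String.ofList_toList]
  | some c =>
    obtain ⟨hc, k, hk, hget, hmin⟩ := List.find?_eq_some_iff_getElem.mp h
    have hgetk : palavra.toList[k]? = some c := by
      rw [List.getElem?_eq_some_iff]; exact ⟨hk, hget⟩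
    have hfindc : PySem.Chars.find palavra.toList [c] = (k : Int) := by
      have hnn : 0 ≤ PySem.Chars.find palavra.toList [c] := by
        rw [PySem.Chars.find_nonneg_iff, single_infix]
        exact hget ▸ List.getElem_mem hk
      obtain ⟨hpre, hmin'⟩ := PySem.Chars.find_spec hnn
      have hle : (PySem.Chars.find palavra.toList [c]).toNat ≤ k := by
        by_contra hlt
        have hklt : k < (PySem.Chars.find palavra.toList [c]).toNat := by omega
        exact hmin' k hklt ((single_prefix_drop c palavra.toList k).mpr hgetk)
      have hge : k ≤ (PySem.Chars.find palavra.toList [c]).toNat := by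
        by_contra hlt
        have hgv := (single_prefix_drop c palavra.toList _).mp hpre
        have hj : (PySem.Chars.find palavra.toList [c]).toNat < k := by omega
        have := hmin _ hj
        rw [(List.getElem?_eq_some_iff.mp hgv).2] at this
        simp [hc] at this
      omega
    have hlow : ∀ v ∈ ['a','e','i','o','u'],
        PySem.Chars.find palavra.toList [v] ≠ -1 →
        (k : Int) ≤ PySem.Chars.find palavra.toList [v] := by
      intro v hv hne
      have hnn : 0 ≤ PySem.Chars.find palavra.toList [v] := by
        have := PySem.Chars.neg_one_le_find palavra.toList [v]
        omega
      obtain ⟨hpre, _⟩ := PySem.Chars.find_spec hnn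
      have hgv := (single_prefix_drop v palavra.toList _).mp hpre
      by_contra hlt
      have hj : (PySem.Chars.find palavra.toList [v]).toNat < k := by omega
      have := hmin _ hj
      rw [(List.getElem?_eq_some_iff.mp hgv).2] at this
      simp [vowel_chars v hv] at this
    have hkm : (k : Int) ∈ pvHits palavra := by
      unfold pvHits
      rw [List.mem_filter]
      constructor
      · rw [List.mem_map]
        refine ⟨c, ?_, hfindc⟩
        have : c ∈ "aeiou".toList := by
          simpa [pvIsVowel, List.contains_iff_mem] using hc
        simpa using this
      · simp
    cases hmq : PySem.List.min? (pvHits palavra) (fun i => i) with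
    | none =>
      rw [PySem.List.min?_eq_none_iff] at hmq
      rw [hmq] at hkm
      simp at hkm
    | some m =>
      have hmem := PySem.List.min?_mem hmq
      unfold pvHits at hmem
      rw [List.mem_filter, List.mem_map] at hmem
      obtain ⟨⟨v, hv, hvf⟩, hne⟩ := hmem
      have hne' : m ≠ -1 := by simpa using hne
      have h1 : (k : Int) ≤ m := hvf ▸ hlow v hv (hvf ▸ hne')
      have h2 : m ≤ (k : Int) := PySem.List.min?_isMin hmq _ hkm
      have hmk : m = (k : Int) := le_antisymm h2 h1
      rw [hmk]
      simp [hgetk]
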